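-- pv_equiv track=rewrite | github.com/Maverick0351a/ODINAIMESH | libs/odin_core/odin/translate.py | extract_sft_headers
-- ===== SOURCE A (Python) =====
-- from typing import Any, Callable, Dict, List, Optional, Set, Union
--
-- def extract_sft_headers(headers: Dict[str, str]) -> Dict[str, str]:
--     """
--     Extract SFT type declarations from HTTP headers.
--
--     Quick Win 5: X-ODIN-SFT-Input-Type and X-ODIN-SFT-Desired-Type headers
--     """
--     sft_headers = {}
--
--     # Standard header names (case-insensitive)
--     header_mappings = {
--         "x-odin-sft-input-type": "input_type",
--         "x-odin-sft-desired-type": "desired_type",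
--         "x-odin-sft-canon-alg": "canon_alg",
--         "x-odin-sft-enforce-gates": "enforce_gates"
--     }
--
--     for header_name, header_value in headers.items():
--         normalized_name = header_name.lower()
--         if normalized_name in header_mappings:
--             sft_headers[header_mappings[normalized_name]] = header_value
--
--     return sft_headers
-- ===== SOURCE B (Python) =====
-- def extract_sft_headers(headers):
--     """Extract SFT type declarations from HTTP headers (case-insensitive)."""
--     header_mappings = {
--         "x-odin-sft-input-type": "input_type",
--         "x-odin-sft-desired-type": "desired_type",
--         "x-odin-sft-canon-alg": "canon_alg",
--         "x-odin-sft-enforce-gates": "enforce_gates",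
--     }
--     lowered = {name.lower(): value for name, value in headers.items()}
--     result = {}
--     for lc_name, key in header_mappings.items():
--         if lc_name in lowered:
--             result[key] = lowered[lc_name]
--     return result
-- ===== Notes on version B (the rewrite author's own statement) =====
-- stated objective: alternative
-- what changed: B inverts the traversal: it builds a lowercased index of the input headers once, then probes the four fixed SFT mappings against that index, instead of scanning every input header against the mapping table; the result dict is equal as a dict but its insertion order is the canonical mapping order.
import Mathlib
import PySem

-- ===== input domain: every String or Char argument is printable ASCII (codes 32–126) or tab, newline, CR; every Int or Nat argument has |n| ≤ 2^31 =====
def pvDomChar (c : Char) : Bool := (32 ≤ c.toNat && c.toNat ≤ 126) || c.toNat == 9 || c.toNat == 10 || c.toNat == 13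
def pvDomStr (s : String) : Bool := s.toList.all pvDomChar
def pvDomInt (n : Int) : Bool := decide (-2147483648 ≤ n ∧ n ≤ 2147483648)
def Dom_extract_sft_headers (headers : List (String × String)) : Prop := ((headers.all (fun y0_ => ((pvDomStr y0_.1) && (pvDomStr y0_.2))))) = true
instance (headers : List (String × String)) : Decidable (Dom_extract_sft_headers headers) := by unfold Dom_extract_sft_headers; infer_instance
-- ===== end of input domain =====

-- B replaces A's scan of every input header against the mapping table by a lowercased index of the
-- headers probed with the four fixed mappings (alternative traversal; same cost; return value only).

-- ===== PORT A =====
-- A's local dict `header_mappings`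
def sftMappingsA : PySem.Dict String String :=
  PySem.Dict.ofList [("x-odin-sft-input-type", "input_type"),
                     ("x-odin-sft-desired-type", "desired_type"),
                     ("x-odin-sft-canon-alg", "canon_alg"),
                     ("x-odin-sft-enforce-gates", "enforce_gates")]

-- the body of A's `for header_name, header_value in headers.items()` loop
def sftStepA (d : PySem.Dict String String) (p : String × String) : PySem.Dict String String :=
  match sftMappingsA.get? (PySem.Str.lower p.1) with
  | some k => d.insert k p.2
  | none => d

def extract_sft_headers (headers : List (String × String)) : List (String × String) :=
  (headers.foldl sftStepA PySem.Dict.empty).items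

-- ===== PORT B =====
-- B's `header_mappings`, iterated as the four (lowercase-name, normalized-key) pairs
def sftMappingsB : List (String × String) :=
  [("x-odin-sft-input-type", "input_type"),
   ("x-odin-sft-desired-type", "desired_type"),
   ("x-odin-sft-canon-alg", "canon_alg"),
   ("x-odin-sft-enforce-gates", "enforce_gates")]

-- B's `lowered = {name.lower(): value for name, value in headers.items()}`
def sftLowered (headers : List (String × String)) : PySem.Dict String String :=
  headers.foldl (fun d p => d.insert (PySem.Str.lower p.1) p.2) PySem.Dict.empty

def extract_sft_headers_alt (headers : List (String × String)) : List (String × String) :=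
  (sftMappingsB.foldl (fun r q =>
      match (sftLowered headers).get? q.1 with
      | some v => r.insert q.2 v
      | none => r) PySem.Dict.empty).items

-- ===== PRECONDITION & SPEC =====
def lowNames (headers : List (String × String)) : List String :=
  headers.map (fun p => PySem.Str.lower p.1)

-- Pre_ excludes inputs on which A still returns: header lists whose matched SFT header names first
-- occur out of the canonical mapping order — there A's and B's results are equal as Python dicts but
-- the accidental dict-insertion order (the association-list order) differs, a corner no one specifies.
def Pre_extract_sft_headers (headers : List (String × String)) : Prop :=
  ("x-odin-sft-input-type" ∈ lowNames headers → "x-odin-sft-desired-type" ∈ lowNames headers →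
     (lowNames headers).idxOf "x-odin-sft-input-type" < (lowNames headers).idxOf "x-odin-sft-desired-type") ∧
  ("x-odin-sft-input-type" ∈ lowNames headers → "x-odin-sft-canon-alg" ∈ lowNames headers →
     (lowNames headers).idxOf "x-odin-sft-input-type" < (lowNames headers).idxOf "x-odin-sft-canon-alg") ∧
  ("x-odin-sft-input-type" ∈ lowNames headers → "x-odin-sft-enforce-gates" ∈ lowNames headers →
     (lowNames headers).idxOf "x-odin-sft-input-type" < (lowNames headers).idxOf "x-odin-sft-enforce-gates") ∧
  ("x-odin-sft-desired-type" ∈ lowNames headers → "x-odin-sft-canon-alg" ∈ lowNames headers →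
     (lowNames headers).idxOf "x-odin-sft-desired-type" < (lowNames headers).idxOf "x-odin-sft-canon-alg") ∧
  ("x-odin-sft-desired-type" ∈ lowNames headers → "x-odin-sft-enforce-gates" ∈ lowNames headers →
     (lowNames headers).idxOf "x-odin-sft-desired-type" < (lowNames headers).idxOf "x-odin-sft-enforce-gates") ∧
  ("x-odin-sft-canon-alg" ∈ lowNames headers → "x-odin-sft-enforce-gates" ∈ lowNames headers →
     (lowNames headers).idxOf "x-odin-sft-canon-alg" < (lowNames headers).idxOf "x-odin-sft-enforce-gates")

instance (headers : List (String × String)) : Decidable (Pre_extract_sft_headers headers) := by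
  unfold Pre_extract_sft_headers; infer_instance

def pvWitness_extract_sft_headers : (List (String × String)) :=
  [("X-ODIN-SFT-Input-Type", "application/json"), ("Content-Type", "text/plain"),
   ("x-odin-sft-desired-type", "odin.task")]

def Spec_extract_sft_headers (headers : List (String × String)) (out : List (String × String)) : Prop :=
  out = extract_sft_headers_alt headers
instance (headers : List (String × String)) (out : List (String × String)) : Decidable (Spec_extract_sft_headers headers out) := by
  unfold Spec_extract_sft_headers; infer_instance

-- ===== CLAIM (what is proved, stated in full; the proofs are below) =====
def Claim_equal_extract_sft_headers : Prop := ∀ (headers : List (String × String)), Dom_extract_sft_headers headers → Pre_extract_sft_headers headers → Spec_extract_sft_headers headers (extract_sft_headers headers)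

-- ===== LEMMAS AND PROOFS =====

-- last value among headers whose lowercased name equals lk (the value both dicts carry at that key)
def sftLast? (headers : List (String × String)) (lk : String) : Option String :=
  headers.foldl (fun o p => if PySem.Str.lower p.1 = lk then some p.2 else o) none

-- the common canonical-order association list both results are shown to equal
def sftCanon (headers : List (String × String)) : List (String × String) :=
  sftMappingsB.filterMap (fun q => (sftLast? headers q.1).map (fun v => (q.2, v)))

theorem lowNames_append (hs : List (String × String)) (h : String × String) :
    lowNames (hs ++ [h]) = lowNames hs ++ [PySem.Str.lower h.1] := by
  simp [lowNames]

theorem sftLast?_concat (hs : List (String × String)) (h : String × String) (lk : String) :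
    sftLast? (hs ++ [h]) lk = if PySem.Str.lower h.1 = lk then some h.2 else sftLast? hs lk := by
  simp [sftLast?, List.foldl_append]

theorem sftLast?_eq_none_iff (hs : List (String × String)) (lk : String) :
    sftLast? hs lk = none ↔ lk ∉ lowNames hs := by
  induction hs using List.reverseRecOn with
  | nil => simp [sftLast?, lowNames]
  | append_singleton hs h ih =>
    rw [sftLast?_concat, lowNames_append]
    by_cases hx : PySem.Str.lower h.1 = lk
    · simp [hx]
    · simp [hx, ih, Ne.symm hx]

theorem sftLast?_mem {hs : List (String × String)} {lk w : String}
    (h : sftLast? hs lk = some w) : lk ∈ lowNames hs := by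
  by_contra hn
  rw [← sftLast?_eq_none_iff] at hn
  simp [h] at hn

theorem idxOf_append_not_mem {a : String} {l l' : List String} (h : a ∉ l) :
    (l ++ l').idxOf a = l.length + l'.idxOf a := by
  induction l with
  | nil => simp
  | cons c cs ih =>
    simp only [List.mem_cons, not_or] at h
    simp [ih h.2, Ne.symm h.1]
    omega

theorem before_tail {a b : String} {l : List String} {x : String}
    (hb : a ∈ l ++ [x] → b ∈ l ++ [x] → (l ++ [x]).idxOf a < (l ++ [x]).idxOf b)
    (ha : a ∈ l) (hbl : b ∈ l) : l.idxOf a < l.idxOf b := by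
  have := hb (by simp [ha]) (by simp [hbl])
  rwa [List.idxOf_append_of_mem ha, List.idxOf_append_of_mem hbl] at this

theorem pre_mono {hs : List (String × String)} {h : String × String}
    (hp : Pre_extract_sft_headers (hs ++ [h])) : Pre_extract_sft_headers hs := by
  unfold Pre_extract_sft_headers at hp ⊢
  rw [lowNames_append] at hp
  obtain ⟨p1, p2, p3, p4, p5, p6⟩ := hp
  exact ⟨before_tail p1, before_tail p2, before_tail p3, before_tail p4, before_tail p5, before_tail p6⟩

-- Pre_ forbids a later canonical key being present before an earlier one first occurs (at the end)
theorem pre_kills {a b w : String} {l : List (String × String)} {x : String}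
    (hb : a ∈ lowNames l ++ [x] → b ∈ lowNames l ++ [x] →
      (lowNames l ++ [x]).idxOf a < (lowNames l ++ [x]).idxOf b)
    (hx : x = a) (ha : sftLast? l a = none) (hbs : sftLast? l b = some w) : False := by
  have hal : a ∉ lowNames l := (sftLast?_eq_none_iff l a).mp ha
  have hbl : b ∈ lowNames l := sftLast?_mem hbs
  have h1 : (lowNames l ++ [x]).idxOf a = (lowNames l).length := by
    rw [hx, idxOf_append_not_mem hal]; simp
  have h2 : (lowNames l ++ [x]).idxOf b = (lowNames l).idxOf b := List.idxOf_append_of_mem hbl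
  have h3 : (lowNames l).idxOf b < (lowNames l).length := List.idxOf_lt_length_of_mem hbl
  have := hb (by simp [hx]) (by simp [hbl])
  omega

-- ===== B-side: extract_sft_headers_alt = sftCanon =====
theorem get?_foldl_lower (l : List (String × String)) (d : PySem.Dict String String) (k : String) :
    (l.foldl (fun d p => d.insert (PySem.Str.lower p.1) p.2) d).get? k
      = l.foldl (fun o p => if PySem.Str.lower p.1 = k then some p.2 else o) (d.get? k) := by
  induction l generalizing d with
  | nil => rfl
  | cons p l ih =>
    simp only [List.foldl_cons]
    rw [ih]
    rcases eq_or_ne (PySem.Str.lower p.1) k with hek | hek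
    · simp [hek]
    · simp [PySem.Dict.get?_insert, hek, Ne.symm hek]

theorem get?_lowered (headers : List (String × String)) (k : String) :
    (sftLowered headers).get? k = sftLast? headers k := by
  unfold sftLowered sftLast?
  rw [get?_foldl_lower]
  simp [PySem.Dict.get?_empty]

theorem bfold (f : String → Option String) :
    ∀ (ps : List (String × String)) (r : PySem.Dict String String),
      (∀ q ∈ ps, r.contains q.2 = false) → (ps.map Prod.snd).Nodup →
      (ps.foldl (fun r q => match f q.1 with | some v => r.insert q.2 v | none => r) r).items
        = r.items ++ ps.filterMap (fun q => (f q.1).map (fun v => (q.2, v)))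
  | [], r, _, _ => by simp
  | q :: ps, r, hc, hn => by
    simp only [List.foldl_cons, List.filterMap_cons]
    rw [List.map_cons] at hn
    have hn' := List.nodup_cons.mp hn
    rcases hf : f q.1 with _ | v
    · rw [bfold f ps r (fun q' hq' => hc q' (List.mem_cons_of_mem _ hq')) (by simpa using hn'.2)]
      simp
    · have hck : r.contains q.2 = false := hc q List.mem_cons_self
      rw [bfold f ps (r.insert q.2 v)
          (fun q' hq' => by
            rw [PySem.Dict.contains_insert]
            have hne : q'.2 ≠ q.2 := by
              intro he
              exact hn'.1 (he ▸ List.mem_map_of_mem hq')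
            simp [hne, hc q' (List.mem_cons_of_mem _ hq')])
          (by simpa using hn'.2)]
      rw [PySem.Dict.items_insert_of_not_contains r v hck]
      simp

theorem alt_eq_canon (headers : List (String × String)) :
    extract_sft_headers_alt headers = sftCanon headers := by
  unfold extract_sft_headers_alt sftCanon
  rw [bfold ((sftLowered headers).get?) sftMappingsB PySem.Dict.empty
      (fun q _ => PySem.Dict.contains_empty q.2) (by decide)]
  simp only [get?_lowered]
  rfl

-- ===== A-side: the fold equals sftCanon under Pre_ =====
theorem stepA_canon (hs : List (String × String)) (h : String × String)
    (hpre : Pre_extract_sft_headers (hs ++ [h])) :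
    sftStepA (PySem.Dict.mk (sftCanon hs)) h = PySem.Dict.mk (sftCanon (hs ++ [h])) := by
  unfold sftStepA
  rcases hget : sftMappingsA.get? (PySem.Str.lower h.1) with _ | k
  · -- the header matches no mapping key: the canon list is unchanged
    have hnot : ∀ q ∈ sftMappingsB, PySem.Str.lower h.1 ≠ q.1 := by
      intro q hq he
      have h0 : sftMappingsA.get? q.1 = none := he ▸ hget
      fin_cases hq <;> exact absurd h0 (by decide)
    simp only []
    congr 1
    unfold sftCanon
    refine List.filterMap_congr (fun q hq => ?_)
    rw [sftLast?_concat, if_neg (hnot q hq)]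
  · have hmem : (PySem.Str.lower h.1, k) ∈ sftMappingsB := by
      have hitems : sftMappingsA.items = sftMappingsB := by decide
      exact hitems ▸ PySem.Dict.mem_items_of_get?_eq_some sftMappingsA hget
    unfold Pre_extract_sft_headers at hpre
    rw [lowNames_append] at hpre
    obtain ⟨p12, p13, p14, p23, p24, p34⟩ := hpre
    simp only [sftMappingsB, List.mem_cons, List.not_mem_nil, or_false, Prod.mk.injEq] at hmem
    rcases hmem with ⟨hn, hk⟩ | ⟨hn, hk⟩ | ⟨hn, hk⟩ | ⟨hn, hk⟩ <;> subst hk <;>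
      rcases o1 : sftLast? hs "x-odin-sft-input-type" with _ | v1 <;>
      rcases o2 : sftLast? hs "x-odin-sft-desired-type" with _ | v2 <;>
      rcases o3 : sftLast? hs "x-odin-sft-canon-alg" with _ | v3 <;>
      rcases o4 : sftLast? hs "x-odin-sft-enforce-gates" with _ | v4 <;>
      first
        | exact (pre_kills p12 hn o1 o2).elim
        | exact (pre_kills p13 hn o1 o3).elim
        | exact (pre_kills p14 hn o1 o4).elim
        | exact (pre_kills p23 hn o2 o3).elim
        | exact (pre_kills p24 hn o2 o4).elim
        | exact (pre_kills p34 hn o3 o4).elim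
        | (apply PySem.Dict.ext;
           simp [sftCanon, sftMappingsB, sftLast?_concat, hn, o1, o2, o3, o4,
                 PySem.Dict.items_insert])

theorem foldA_canon : ∀ headers : List (String × String), Pre_extract_sft_headers headers →
    headers.foldl sftStepA PySem.Dict.empty = PySem.Dict.mk (sftCanon headers) := by
  intro headers
  induction headers using List.reverseRecOn with
  | nil => intro _; rfl
  | append_singleton hs h ih =>
    intro hp
    rw [List.foldl_append]
    simp only [List.foldl_cons, List.foldl_nil]
    rw [ih (pre_mono hp), stepA_canon hs h hp]

-- ===== VERDICT (by name: the statement is the Claim_ definition above) =====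
theorem extract_sft_headers_spec : Claim_equal_extract_sft_headers := by
  intro headers _ hpre
  unfold Spec_extract_sft_headers
  rw [alt_eq_canon]
  unfold extract_sft_headers
  rw [foldA_canon headers hpre]
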